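-- pv_equiv track=rewrite | github.com/DScibrany/starzpools | scripts/generate_og.py | collapse_blocks
-- ===== SOURCE A (Python) =====
-- def collapse_blocks(free, slot_minutes, start_min):
--     blocks = []
--     i, n = 0, len(free)
--     while i < n:
--         if free[i] == 0:
--             i += 1
--             continue
--         j = i
--         while j < n and free[j] == free[i]:
--             j += 1
--         blocks.append({
--             "start": start_min + i * slot_minutes,
--             "end": start_min + j * slot_minutes,
--             "lanes": free[i],
--         })
--         i = j
--     return blocks
-- ===== SOURCE B (Python) =====
-- def collapse_blocks(free, slot_minutes, start_min):
--     # change-point pass: collect all run boundaries, then build blocks from consecutive pairs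
--     n = len(free)
--     bounds = [k for k in range(n + 1) if k == 0 or k == n or free[k] != free[k - 1]]
--     blocks = []
--     for i, j in zip(bounds, bounds[1:]):
--         if free[i] != 0:
--             blocks.append({
--                 "start": start_min + i * slot_minutes,
--                 "end": start_min + j * slot_minutes,
--                 "lanes": free[i],
--             })
--     return blocks
-- ===== Notes on version B (the rewrite author's own statement) =====
-- stated objective: alternative
-- what changed: Replaces the nested two-pointer while-loop scan with two flat passes: first collect all run change-points (boundaries), then build the blocks from consecutive boundary pairs, skipping zero-valued runs.
import Mathlib
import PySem

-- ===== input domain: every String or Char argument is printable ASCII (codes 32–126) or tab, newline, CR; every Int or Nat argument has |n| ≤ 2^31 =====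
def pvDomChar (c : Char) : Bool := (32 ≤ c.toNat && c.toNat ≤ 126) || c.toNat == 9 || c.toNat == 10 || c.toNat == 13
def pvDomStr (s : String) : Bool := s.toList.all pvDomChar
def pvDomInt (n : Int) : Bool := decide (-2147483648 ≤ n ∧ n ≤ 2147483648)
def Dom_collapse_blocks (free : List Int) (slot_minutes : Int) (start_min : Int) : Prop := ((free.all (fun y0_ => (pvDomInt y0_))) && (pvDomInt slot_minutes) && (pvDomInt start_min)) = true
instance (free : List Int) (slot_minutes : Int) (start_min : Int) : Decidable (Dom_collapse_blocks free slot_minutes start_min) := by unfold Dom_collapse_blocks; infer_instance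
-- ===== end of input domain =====

-- B replaces A's nested two-pointer while-loop scan by two flat passes (collect run change-points,
-- then build blocks from consecutive boundary pairs); objective: alternative decomposition, same cost.

-- shared indexing helper: both ports only index with k in range, so getD equals Python's free[k]
def pvGet (free : List Int) (k : Nat) : Int := free.getD k 0

-- ===== PORT A =====
-- inner 'while j < n and free[j] == free[i]' loop (v = free[i])
def pvAInner (free : List Int) (n : Nat) (v : Int) (j : Nat) : Nat :=
  if j < n then
    if pvGet free j = v then pvAInner free n v (j + 1) else j
  else j
termination_by n - j

theorem pvAInner_ge (free : List Int) (n : Nat) (v : Int) :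
    ∀ d j, n - j ≤ d → j ≤ pvAInner free n v j := by
  intro d
  induction d with
  | zero =>
    intro j hd
    rw [pvAInner]
    split
    · next h => exact absurd h (by omega)
    · exact le_refl _
  | succ d ih =>
    intro j hd
    rw [pvAInner]
    split
    · next h =>
      split
      · exact le_trans (by omega) (ih (j + 1) (by omega))
      · exact le_refl _
    · exact le_refl _

-- j strictly advances past i (used for the outer loop's termination)
theorem pvAInner_gt (free : List Int) (n : Nat) (v : Int) (j : Nat)
    (hj : j < n) (hv : pvGet free j = v) : j < pvAInner free n v j := by
  have h1 : pvAInner free n v j = pvAInner free n v (j + 1) := by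
    rw [pvAInner, if_pos hj, if_pos hv]
  have h2 := pvAInner_ge free n v (n - (j + 1)) (j + 1) (le_refl _)
  omega

-- outer 'while i < n' loop with the running blocks list
def pvALoop (free : List Int) (slot_minutes start_min : Int) (n i : Nat)
    (blocks : List (List (String × Int))) : List (List (String × Int)) :=
  if h : i < n then
    if pvGet free i = 0 then
      pvALoop free slot_minutes start_min n (i + 1) blocks
    else
      let j := pvAInner free n (pvGet free i) i
      pvALoop free slot_minutes start_min n j
        (blocks ++ [[("start", start_min + (i : Int) * slot_minutes),
                     ("end", start_min + (j : Int) * slot_minutes),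
                     ("lanes", pvGet free i)]])
  else blocks
termination_by n - i
decreasing_by
  · omega
  · have := pvAInner_gt free n (pvGet free i) i h rfl
    omega

def collapse_blocks (free : List Int) (slot_minutes : Int) (start_min : Int) :
    List (List (String × Int)) :=
  pvALoop free slot_minutes start_min free.length 0 []

-- ===== PORT B =====
-- change-point pass: k is a boundary iff k = 0, k = n, or free[k] != free[k-1]
def pvBounds (free : List Int) : List Nat :=
  (List.range (free.length + 1)).filter
    (fun k => decide (k = 0) || decide (k = free.length) ||
              decide (pvGet free k ≠ pvGet free (k - 1)))

def collapse_blocks_alt (free : List Int) (slot_minutes : Int) (start_min : Int) :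
    List (List (String × Int)) :=
  let bounds := pvBounds free
  (bounds.zip bounds.tail).foldl
    (fun blocks q =>
      if pvGet free q.1 ≠ 0 then
        blocks ++ [[("start", start_min + (q.1 : Int) * slot_minutes),
                    ("end", start_min + (q.2 : Int) * slot_minutes),
                    ("lanes", pvGet free q.1)]]
      else blocks)
    []

-- ===== PRECONDITION & SPEC =====
def Spec_collapse_blocks (free : List Int) (slot_minutes : Int) (start_min : Int) (out : List (List (String × Int))) : Prop := out = collapse_blocks_alt free slot_minutes start_min
instance (free : List Int) (slot_minutes : Int) (start_min : Int) (out : List (List (String × Int))) : Decidable (Spec_collapse_blocks free slot_minutes start_min out) := by unfold Spec_collapse_blocks; infer_instance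

-- ===== CLAIM (what is proved, stated in full; the proofs are below) =====
def Claim_equal_collapse_blocks : Prop := ∀ (free : List Int) (slot_minutes : Int) (start_min : Int), Dom_collapse_blocks free slot_minutes start_min → Spec_collapse_blocks free slot_minutes start_min (collapse_blocks free slot_minutes start_min)

-- ===== LEMMAS AND PROOFS =====

-- boundary predicate of B's first pass
def pvP (free : List Int) (k : Nat) : Bool :=
  decide (k = 0) || decide (k = free.length) ||
  decide (pvGet free k ≠ pvGet free (k - 1))

-- the boundaries ≥ i
def pvBndsFrom (free : List Int) (i : Nat) : List Nat :=
  (List.range' i (free.length + 1 - i)).filter (pvP free)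

-- one rendered block
def pvBlk (free : List Int) (slot_minutes start_min : Int) (q : Nat × Nat) : List (String × Int) :=
  [("start", start_min + (q.1 : Int) * slot_minutes),
   ("end", start_min + (q.2 : Int) * slot_minutes),
   ("lanes", pvGet free q.1)]

theorem pvBounds_eq (free : List Int) : pvBounds free = pvBndsFrom free 0 := by
  unfold pvBounds pvBndsFrom pvP
  rw [List.range_eq_range', Nat.sub_zero]

theorem pvBndsFrom_n (free : List Int) : pvBndsFrom free free.length = [free.length] := by
  unfold pvBndsFrom
  rw [Nat.add_sub_cancel_left, List.range'_one, List.filter_cons]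
  simp [pvP]

theorem pvBndsFrom_cons (free : List Int) (i : Nat) (hi : i ≤ free.length)
    (hP : pvP free i = true) : pvBndsFrom free i = i :: pvBndsFrom free (i + 1) := by
  unfold pvBndsFrom
  have h : free.length + 1 - i = (free.length + 1 - (i + 1)) + 1 := by omega
  rw [h, List.range'_succ, List.filter_cons, hP]
  simp

theorem pvBndsFrom_skip (free : List Int) (i : Nat) (hi : i ≤ free.length)
    (hP : pvP free i = false) : pvBndsFrom free i = pvBndsFrom free (i + 1) := by
  unfold pvBndsFrom
  have h : free.length + 1 - i = (free.length + 1 - (i + 1)) + 1 := by omega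
  rw [h, List.range'_succ, List.filter_cons, hP]
  simp

theorem pvBndsFrom_peel (free : List Int) (j : Nat) (hj : j ≤ free.length) :
    ∀ d i, j - i ≤ d → i ≤ j → (∀ k, i ≤ k → k < j → pvP free k = false) →
    pvBndsFrom free i = pvBndsFrom free j := by
  intro d
  induction d with
  | zero =>
    intro i h1 h2 _
    exact congrArg (pvBndsFrom free) (by omega)
  | succ d ih =>
    intro i h1 h2 hk
    by_cases hij : i = j
    · rw [hij]
    · rw [pvBndsFrom_skip free i (by omega) (hk i (le_refl _) (by omega))]
      exact ih (i + 1) (by omega) (by omega) (fun k hk1 hk2 => hk k (by omega) hk2)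

-- properties of the inner scan
theorem pvAInner_spec (free : List Int) (n : Nat) (v : Int) :
    ∀ d j, n - j ≤ d → j ≤ n →
      pvAInner free n v j ≤ n ∧
      (∀ k, j ≤ k → k < pvAInner free n v j → pvGet free k = v) ∧
      (pvAInner free n v j = n ∨ pvGet free (pvAInner free n v j) ≠ v) := by
  intro d
  induction d with
  | zero =>
    intro j h1 h2
    have hjn : j = n := by omega
    have heq : pvAInner free n v j = j := by rw [pvAInner, if_neg (by omega)]
    rw [heq]
    exact ⟨by omega, by intro k hk1 hk2; omega, Or.inl hjn⟩
  | succ d ih =>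
    intro j h1 h2
    by_cases hj : j < n
    · by_cases hv : pvGet free j = v
      · have heq : pvAInner free n v j = pvAInner free n v (j + 1) := by
          rw [pvAInner, if_pos hj, if_pos hv]
        obtain ⟨a2, a3, a4⟩ := ih (j + 1) (by omega) (by omega)
        rw [heq]
        refine ⟨a2, ?_, a4⟩
        intro k hk1 hk2
        by_cases hkj : k = j
        · rw [hkj]; exact hv
        · exact a3 k (by omega) hk2
      · have heq : pvAInner free n v j = j := by
          rw [pvAInner, if_pos hj, if_neg hv]
        rw [heq]
        exact ⟨by omega, by intro k hk1 hk2; omega, Or.inr hv⟩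
    · have heq : pvAInner free n v j = j := by rw [pvAInner, if_neg hj]
      rw [heq]
      exact ⟨h2, by intro k hk1 hk2; omega, Or.inl (by omega)⟩

-- the rendering fold applied to a pair list, in closed form
theorem pvRend_eq (free : List Int) (s st : Int) (l : List (Nat × Nat))
    (acc : List (List (String × Int))) :
    l.foldl (fun blocks q =>
      if pvGet free q.1 ≠ 0 then blocks ++ [pvBlk free s st q] else blocks) acc
    = acc ++ (l.filter (fun q : Nat × Nat => decide (pvGet free q.1 ≠ 0))).map (pvBlk free s st) :=
  PySem.List.foldl_append_ite (fun q : Nat × Nat => pvGet free q.1 ≠ 0) (pvBlk free s st) l acc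

-- main invariant: from any reachable index i, A's loop appends exactly B's remaining blocks
theorem pvALoop_eq (free : List Int) (s st : Int) :
    ∀ d i blocks, free.length - i ≤ d → i ≤ free.length →
      (i = 0 ∨ pvGet free (i - 1) = 0 ∨ pvGet free (i - 1) ≠ pvGet free i) →
      pvALoop free s st free.length i blocks
        = blocks ++ (((pvBndsFrom free i).zip (pvBndsFrom free i).tail).filter
            (fun q : Nat × Nat => decide (pvGet free q.1 ≠ 0))).map (pvBlk free s st) := by
  intro d
  induction d with
  | zero =>
    intro i blocks h1 h2 _
    have hin : i = free.length := by omega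
    subst hin
    rw [pvALoop, dif_neg (by omega), pvBndsFrom_n]
    simp
  | succ d ih =>
    intro i blocks h1 h2 hInv
    by_cases hi : i < free.length
    · by_cases hz : pvGet free i = 0
      · -- skip a zero slot
        have hstep : pvALoop free s st free.length i blocks
            = pvALoop free s st free.length (i + 1) blocks := by
          rw [pvALoop, dif_pos hi, if_pos hz]
        rw [hstep, ih (i + 1) blocks (by omega) (by omega)
              (Or.inr (Or.inl (by simpa using hz)))]
        -- the pair lists render the same: a possible leading pair has free[i] = 0
        by_cases hP : pvP free i = true
        · rw [pvBndsFrom_cons free i (by omega) hP]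
          cases hbs : pvBndsFrom free (i + 1) with
          | nil => simp
          | cons b bs' =>
            simp only [List.tail_cons, List.zip_cons_cons, List.filter_cons]
            rw [if_neg (by simp [hz])]
        · rw [pvBndsFrom_skip free i (by omega) (by simpa using hP)]
      · -- emit the block [i, j)
        obtain ⟨a2, a3, a4⟩ :=
          pvAInner_spec free free.length (pvGet free i) (free.length - i) i (le_refl _) (by omega)
        have hij : i < pvAInner free free.length (pvGet free i) i :=
          pvAInner_gt free free.length (pvGet free i) i hi rfl
        have hstep : pvALoop free s st free.length i blocks
            = pvALoop free s st free.length (pvAInner free free.length (pvGet free i) i)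
                (blocks ++ [pvBlk free s st (i, pvAInner free free.length (pvGet free i) i)]) := by
          rw [pvALoop, dif_pos hi, if_neg hz]
          rfl
        generalize hjdef : pvAInner free free.length (pvGet free i) i = j at hstep hij a2 a3 a4
        have hPi : pvP free i = true := by
          rcases hInv with h | h | h
          · simp [pvP, h]
          · simp only [pvP, Bool.or_eq_true, decide_eq_true_eq]
            right; rw [h]; exact hz
          · simp only [pvP, Bool.or_eq_true, decide_eq_true_eq]
            right; exact Ne.symm h
        have hPj : pvP free j = true := by
          rcases a4 with h | h
          · simp [pvP, h]
          · simp only [pvP, Bool.or_eq_true, decide_eq_true_eq]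
            right
            rw [a3 (j - 1) (by omega) (by omega)]
            exact h
        have hmid : ∀ k, i + 1 ≤ k → k < j → pvP free k = false := by
          intro k hk1 hk2
          simp only [pvP, Bool.or_eq_false_iff, decide_eq_false_iff_not, not_not]
          refine ⟨⟨by omega, by omega⟩, ?_⟩
          rw [a3 k (by omega) (by omega), a3 (k - 1) (by omega) (by omega)]
        have hbnds : pvBndsFrom free i = i :: pvBndsFrom free j := by
          rw [pvBndsFrom_cons free i (by omega) hPi,
              pvBndsFrom_peel free j a2 (j - (i + 1)) (i + 1) (le_refl _) (by omega) hmid]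
        have hrest : pvBndsFrom free j = j :: pvBndsFrom free (j + 1) :=
          pvBndsFrom_cons free j a2 hPj
        have hInvj : j = 0 ∨ pvGet free (j - 1) = 0 ∨ pvGet free (j - 1) ≠ pvGet free j := by
          right; right
          rw [a3 (j - 1) (by omega) (by omega)]
          rcases a4 with h | h
          · rw [h]
            have hdef : pvGet free free.length = 0 :=
              List.getD_eq_default free 0 (le_refl _)
            rw [hdef]; exact hz
          · exact fun hc => h hc.symm
        rw [hstep, ih j (blocks ++ [pvBlk free s st (i, j)]) (by omega) a2 hInvj]
        rw [hbnds, hrest]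
        simp only [List.tail_cons, List.zip_cons_cons, List.filter_cons]
        rw [if_pos (by simpa using hz)]
        rw [← hrest]
        simp
    · have hin : i = free.length := by omega
      subst hin
      rw [pvALoop, dif_neg (by omega), pvBndsFrom_n]
      simp

-- ===== VERDICT (by name: the statement is the Claim_ definition above) =====
theorem collapse_blocks_spec : Claim_equal_collapse_blocks := by
  intro free s st _
  unfold Spec_collapse_blocks collapse_blocks collapse_blocks_alt
  rw [pvALoop_eq free s st free.length 0 [] (by omega) (by omega) (Or.inl rfl)]
  rw [pvBounds_eq]
  rw [show (fun (blocks : List (List (String × Int))) (q : Nat × Nat) =>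
      if pvGet free q.1 ≠ 0 then
        blocks ++ [[("start", st + (q.1 : Int) * s), ("end", st + (q.2 : Int) * s),
                    ("lanes", pvGet free q.1)]]
      else blocks)
    = (fun blocks q => if pvGet free q.1 ≠ 0 then blocks ++ [pvBlk free s st q] else blocks)
    from rfl]
  rw [pvRend_eq]
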